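-- pv_equiv track=rewrite | github.com/pypi-data/pypi-mirror-401 | packages/osv-reproducer/osv_reproducer-0.0.9.tar.gz/osv_reproducer-0.0.9/tests/test_parse_report.py | modify_report_content
-- ===== SOURCE A (Python) =====
-- def modify_report_content(report_content, omit_sections=None):
--     """Modify a report by omitting specified sections.
--
--     Args:
--         report_content (str): The original report content
--         omit_sections (list): List of section prefixes to omit from the report
--
--     Returns:
--         str: The modified report content
--     """
--     if omit_sections is None:
--         omit_sections = []
--
--     # Split the report into lines
--     lines = report_content.split('\n')
--
--     # Filter out lines that start with any of the omit_sections
--     filtered_lines = []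
--     skip_next_line = False
--
--     for line in lines:
--         # Check if we should skip this line based on previous line
--         if skip_next_line:
--             if line.strip() == "":  # If this is a blank line after a section we're skipping
--                 skip_next_line = False
--             continue
--
--         # Check if this line starts with any of the sections to omit
--         should_omit = False
--         for section in omit_sections:
--             if line.strip().startswith(section):
--                 should_omit = True
--                 skip_next_line = True  # Skip the next line too (usually a blank line)
--                 break
--
--         if not should_omit:
--             filtered_lines.append(line)
--
--     return "\n".join(filtered_lines)
-- ===== SOURCE B (Python) =====
-- def modify_report_content(report_content, omit_sections=None):
--     """Modify a report by omitting specified sections.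
--
--     Two-stage version: first group the lines into blank-terminated
--     paragraphs, then truncate each paragraph at its first line matching
--     an omitted-section prefix (dropping the rest of that paragraph,
--     including its terminating blank line).
--     """
--     secs = omit_sections if omit_sections is not None else []
--
--     # Stage 1: group lines into blank-terminated paragraphs.
--     paragraphs = []
--     current = []
--     for line in report_content.split('\n'):
--         current.append(line)
--         if line.strip() == "":
--             paragraphs.append(current)
--             current = []
--     if current:
--         paragraphs.append(current)
--
--     # Stage 2: keep each paragraph's prefix up to its first matching line.
--     kept = []
--     for para in paragraphs:
--         head = []
--         for line in para:
--             if any(line.strip().startswith(s) for s in secs):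
--                 break
--             head.append(line)
--         kept.extend(head)
--
--     return "\n".join(kept)
-- ===== Notes on version B (the rewrite author's own statement) =====
-- stated objective: alternative
-- what changed: Replaced A's single-pass flag state machine with a two-stage pipeline: stage 1 groups the lines into blank-terminated paragraphs, stage 2 truncates each paragraph at its first line matching an omit prefix and concatenates the kept prefixes.
import Mathlib
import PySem

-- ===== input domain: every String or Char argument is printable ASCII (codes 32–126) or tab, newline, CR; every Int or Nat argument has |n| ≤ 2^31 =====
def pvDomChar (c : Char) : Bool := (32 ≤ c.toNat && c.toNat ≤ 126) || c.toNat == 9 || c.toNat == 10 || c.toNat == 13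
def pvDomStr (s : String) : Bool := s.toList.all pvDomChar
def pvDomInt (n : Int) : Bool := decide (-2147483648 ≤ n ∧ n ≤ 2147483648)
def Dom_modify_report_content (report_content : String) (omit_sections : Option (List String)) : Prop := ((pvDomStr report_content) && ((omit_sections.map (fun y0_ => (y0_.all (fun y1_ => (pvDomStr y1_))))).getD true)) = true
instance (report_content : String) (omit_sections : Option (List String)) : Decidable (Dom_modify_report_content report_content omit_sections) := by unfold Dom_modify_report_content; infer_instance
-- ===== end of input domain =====

-- B replaces A's one-pass skip_next_line flag state machine by a two-stage pipeline:
-- group lines into blank-terminated paragraphs, then truncate each paragraph at its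
-- first matching header line (alternative decomposition, same cost).

-- ===== PORT A =====
-- A's for-loop over lines with state (filtered_lines, skip_next_line);
-- the inner for/break over omit_sections is the existence test List.any.
def pvALoop (secs : List String) : List String → List String → Bool → List String
  | [], acc, _ => acc
  | l :: ls, acc, skip =>
    if skip then
      if PySem.Str.strip l = "" then pvALoop secs ls acc false
      else pvALoop secs ls acc true
    else
      if secs.any (fun s => PySem.Str.startswith (PySem.Str.strip l) s) then
        pvALoop secs ls acc true
      else
        pvALoop secs ls (acc ++ [l]) false

def modify_report_content (report_content : String) (omit_sections : Option (List String)) : String :=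
  let secs := omit_sections.getD []
  let lines := (PySem.Str.split? report_content "\n").getD []
  PySem.Str.join "\n" (pvALoop secs lines [] false)

-- ===== PORT B =====
-- Source B stage 1: group the lines into blank-terminated paragraphs
-- (the for-loop with state (paragraphs, current), plus the final 'if current:').
def pvStage1 : List String → List (List String) → List String → List (List String)
  | [], paragraphs, current => if current = [] then paragraphs else paragraphs ++ [current]
  | l :: ls, paragraphs, current =>
    if PySem.Str.strip l = "" then pvStage1 ls (paragraphs ++ [current ++ [l]]) []
    else pvStage1 ls paragraphs (current ++ [l])

-- Source B stage 2 inner loop: a paragraph's prefix up to its first matching line.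
def pvHead (secs : List String) : List String → List String
  | [] => []
  | l :: ls =>
    if secs.any (fun s => PySem.Str.startswith (PySem.Str.strip l) s) then []
    else l :: pvHead secs ls

def modify_report_content_alt (report_content : String) (omit_sections : Option (List String)) : String :=
  let secs := omit_sections.getD []
  let paragraphs := pvStage1 ((PySem.Str.split? report_content "\n").getD []) [] []
  let kept := paragraphs.foldl (fun acc p => acc ++ pvHead secs p) []
  PySem.Str.join "\n" kept

-- ===== PRECONDITION & SPEC =====
def Spec_modify_report_content (report_content : String) (omit_sections : Option (List String)) (out : String) : Prop := out = modify_report_content_alt report_content omit_sections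
instance (report_content : String) (omit_sections : Option (List String)) (out : String) : Decidable (Spec_modify_report_content report_content omit_sections out) := by unfold Spec_modify_report_content; infer_instance

-- ===== CLAIM (what is proved, stated in full; the proofs are below) =====
def Claim_equal_modify_report_content : Prop := ∀ (report_content : String) (omit_sections : Option (List String)), Dom_modify_report_content report_content omit_sections → Spec_modify_report_content report_content omit_sections (modify_report_content report_content omit_sections)

-- ===== LEMMAS AND PROOFS =====

-- shorthand (proof-side only): the match test both ports use
def pvM (secs : List String) (l : String) : Bool :=
  secs.any (fun s => PySem.Str.startswith (PySem.Str.strip l) s)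

-- proof-side view of B's stage-2 fold: flattened heads
def pvKcat (secs : List String) (ps : List (List String)) : List String :=
  (ps.map (pvHead secs)).flatten

theorem pvFoldl_kcat (secs : List String) (ps : List (List String)) (acc : List String) :
    ps.foldl (fun acc p => acc ++ pvHead secs p) acc = acc ++ pvKcat secs ps := by
  induction ps generalizing acc with
  | nil => simp [pvKcat]
  | cons p ps ih => simp [pvKcat, List.foldl, ih, List.append_assoc]

theorem pvStage1_acc (ls : List String) (paras : List (List String)) (cur : List String) :
    pvStage1 ls paras cur = paras ++ pvStage1 ls [] cur := by
  induction ls generalizing paras cur with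
  | nil => by_cases h : cur = [] <;> simp [pvStage1, h]
  | cons l ls ih =>
    by_cases h : PySem.Str.strip l = ""
    · rw [pvStage1, if_pos h, pvStage1, if_pos h, ih (paras ++ [cur ++ [l]]) [],
        ih ([] ++ [cur ++ [l]]) []]
      simp
    · rw [pvStage1, if_neg h, pvStage1, if_neg h, ih]

theorem pvHead_append_nomatch (secs : List String) (xs ys : List String)
    (h : ∀ x ∈ xs, pvM secs x = false) :
    pvHead secs (xs ++ ys) = xs ++ pvHead secs ys := by
  induction xs with
  | nil => simp
  | cons x xs ih =>
    have hx := h x (by simp)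
    simp only [List.cons_append, pvHead]
    rw [if_neg (by simpa [pvM] using hx), ih (fun a ha => h a (by simp [ha]))]

theorem pvHead_append_match (secs : List String) (xs ys : List String)
    (h : ∃ x ∈ xs, pvM secs x = true) :
    pvHead secs (xs ++ ys) = pvHead secs xs := by
  induction xs with
  | nil => simp at h
  | cons x xs ih =>
    by_cases hx : pvM secs x = true
    · simp only [List.cons_append, pvHead]
      rw [if_pos (by simpa [pvM] using hx), if_pos (by simpa [pvM] using hx)]
    · obtain ⟨a, ha, hma⟩ := h
      rcases List.mem_cons.mp ha with rfl | ha'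
      · exact absurd hma hx
      · simp only [List.cons_append, pvHead]
        rw [if_neg (by simpa [pvM] using hx), if_neg (by simpa [pvM] using hx),
          ih ⟨a, ha', hma⟩]

-- with "" among the omitted prefixes every line matches, so A appends nothing
theorem pvAll_match (secs : List String) (hE : "" ∈ secs) (l : String) :
    pvM secs l = true := by
  refine List.any_eq_true.mpr ⟨"", hE, ?_⟩
  simp [PySem.Chars.startswith_iff]

theorem pvALoop_all (secs : List String) (hE : "" ∈ secs) (lines acc : List String) (b : Bool) :
    pvALoop secs lines acc b = acc := by
  induction lines generalizing acc b with
  | nil => rfl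
  | cons l ls ih =>
    rw [pvALoop]
    cases b with
    | true => rw [if_pos rfl]; split <;> exact ih acc _
    | false =>
      rw [if_neg (by simp)]
      rw [if_pos (by simpa [pvM] using pvAll_match secs hE l)]
      exact ih acc _

theorem pvKcat_all (secs : List String) (hE : "" ∈ secs) (lines cur : List String) :
    pvKcat secs (pvStage1 lines [] cur) = [] := by
  induction lines generalizing cur with
  | nil =>
    by_cases h : cur = []
    · simp [pvStage1, h, pvKcat]
    · rw [pvStage1, if_neg h]
      cases cur with
      | nil => simp at h
      | cons c cs =>
        simp [pvKcat, pvHead, (by simpa [pvM] using pvAll_match secs hE c : _)]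
  | cons l ls ih =>
    by_cases h : PySem.Str.strip l = ""
    · rw [pvStage1, if_pos h, pvStage1_acc]
      have : pvHead secs (cur ++ [l]) = [] := by
        cases cur with
        | nil => simp [pvHead, (by simpa [pvM] using pvAll_match secs hE l : _)]
        | cons c cs => simp [pvHead, (by simpa [pvM] using pvAll_match secs hE c : _)]
      simp [pvKcat] at ih ⊢
      exact ⟨by simpa [pvKcat] using this, by simpa [pvKcat] using ih []⟩
    · rw [pvStage1, if_neg h]
      exact ih (cur ++ [l])

-- without "" among the prefixes a blank line never matches
theorem pvBlank_nomatch (secs : List String) (hE : "" ∉ secs) (l : String)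
    (h : PySem.Str.strip l = "") : pvM secs l = false := by
  rw [pvM, h]
  refine List.any_eq_false.mpr (fun s hs => ?_)
  simp only [Bool.not_eq_true]
  by_contra hc
  rw [Bool.not_eq_false, PySem.Str.startswith_eq, PySem.Chars.startswith_iff] at hc
  simp at hc
  have hse : s = "" := by cases s; simpa [String.toList] using hc
  exact hE (hse ▸ hs)

-- the main correspondence: A's flag machine against B's paragraph pipeline
theorem pvMain (secs : List String) (hE : "" ∉ secs) (lines : List String) :
    (∀ cur acc, (∀ x ∈ cur, pvM secs x = false) →
      pvALoop secs lines (acc ++ cur) false = acc ++ pvKcat secs (pvStage1 lines [] cur)) ∧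
    (∀ cur acc, (∃ x ∈ cur, pvM secs x = true) →
      pvALoop secs lines (acc ++ pvHead secs cur) true = acc ++ pvKcat secs (pvStage1 lines [] cur)) := by
  induction lines with
  | nil =>
    constructor
    · intro cur acc hcur
      by_cases h : cur = []
      · simp [pvALoop, pvStage1, h, pvKcat]
      · rw [pvALoop, pvStage1, if_neg h]
        have : pvHead secs cur = cur := by
          simpa [pvHead] using pvHead_append_nomatch secs cur [] hcur
        simp [pvKcat, this]
    · intro cur acc hcur
      have h : cur ≠ [] := by rintro rfl; simp at hcur
      rw [pvALoop, pvStage1, if_neg h]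
      simp [pvKcat]
  | cons l ls ih =>
    obtain ⟨ihF, ihT⟩ := ih
    constructor
    · intro cur acc hcur
      rw [pvALoop]
      rw [if_neg (by simp)]
      by_cases hm : pvM secs l = true
      · -- l matches: A enters skip state; B truncates this paragraph at l
        have hb : PySem.Str.strip l ≠ "" := fun hb =>
          by rw [pvBlank_nomatch secs hE l hb] at hm; exact absurd hm (by simp)
        rw [if_pos (by simpa [pvM] using hm)]
        rw [pvStage1, if_neg hb]
        have hhead : pvHead secs (cur ++ [l]) = cur := by
          rw [pvHead_append_nomatch secs cur [l] hcur]
          simp [pvHead, (by simpa [pvM] using hm : _)]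
        have := ihT (cur ++ [l]) acc ⟨l, by simp, hm⟩
        rw [hhead] at this
        exact this
      · rw [if_neg (by simpa [pvM] using hm)]
        by_cases hb : PySem.Str.strip l = ""
        · -- kept blank line: paragraph boundary
          rw [pvStage1, if_pos hb, pvStage1_acc]
          have hcur' : ∀ x ∈ cur ++ [l], pvM secs x = false := by
            intro x hx
            rcases List.mem_append.mp hx with hx | hx
            · exact hcur x hx
            · simp at hx; subst hx; simpa using hm
          have hhead : pvHead secs (cur ++ [l]) = cur ++ [l] := by
            simpa [pvHead] using pvHead_append_nomatch secs (cur ++ [l]) [] hcur'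
          have := ihF [] (acc ++ (cur ++ [l])) (by simp)
          simp only [List.append_nil] at this
          rw [show acc ++ cur ++ [l] = acc ++ (cur ++ [l]) by simp, this]
          simp [pvKcat, hhead, List.append_assoc]
        · -- kept non-blank line: paragraph grows
          rw [pvStage1, if_neg hb]
          have hcur' : ∀ x ∈ cur ++ [l], pvM secs x = false := by
            intro x hx
            rcases List.mem_append.mp hx with hx | hx
            · exact hcur x hx
            · simp at hx; subst hx; simpa using hm
          have := ihF (cur ++ [l]) acc hcur'
          rw [show acc ++ cur ++ [l] = acc ++ (cur ++ [l]) by simp]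
          exact this
    · intro cur acc hcur
      rw [pvALoop, if_pos rfl]
      by_cases hb : PySem.Str.strip l = ""
      · -- blank line ends the skipped section; B ends the paragraph
        rw [if_pos hb, pvStage1, if_pos hb, pvStage1_acc]
        have hhead : pvHead secs (cur ++ [l]) = pvHead secs cur :=
          pvHead_append_match secs cur [l] hcur
        have := ihF [] (acc ++ pvHead secs cur) (by simp)
        simp only [List.append_nil] at this
        rw [this]
        simp [pvKcat, hhead, List.append_assoc]
      · -- still inside the skipped section; B's paragraph grows past the cut
        rw [if_neg hb, pvStage1, if_neg hb]
        have hhead : pvHead secs (cur ++ [l]) = pvHead secs cur :=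
          pvHead_append_match secs cur [l] hcur
        obtain ⟨x, hx, hmx⟩ := hcur
        have := ihT (cur ++ [l]) acc ⟨x, List.mem_append.mpr (Or.inl hx), hmx⟩
        rw [hhead] at this
        exact this

-- ===== VERDICT (by name: the statement is the Claim_ definition above) =====
theorem modify_report_content_spec : Claim_equal_modify_report_content := by
  intro rc os _
  unfold Spec_modify_report_content
  simp only [modify_report_content, modify_report_content_alt]
  rw [pvFoldl_kcat]
  by_cases hE : "" ∈ os.getD []
  · rw [pvALoop_all _ hE, pvKcat_all _ hE]; simp
  · have := (pvMain (os.getD []) hE ((PySem.Str.split? rc "\n").getD [])).1 [] [] (by simp)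
    simp only [List.append_nil, List.nil_append] at this
    rw [this]
    simp
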